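-- pv_equiv track=rewrite | github.com/tkwind/repoclean | repoclean/path_utils.py | is_allowlisted
-- ===== SOURCE A (Python) =====
-- def _norm_rel_path(p: str) -> str:
--     return (p or "").strip().replace("\\", "/").lstrip("./")
--
-- def is_allowlisted(rel_path: str, allowlist: list[str]) -> bool:
--     rel_path = _norm_rel_path(rel_path)
--
--     for prefix in allowlist:
--         prefix = _norm_rel_path(prefix)
--         if not prefix:
--             continue
--
--         if not prefix.endswith("/"):
--             prefix += "/"
--
--         if rel_path.startswith(prefix):
--             return True
--
--     return False
-- ===== SOURCE B (Python) =====
-- def _norm_rel_path(p: str) -> str: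
--     return (p or "").strip().replace("\\", "/").lstrip("./")
--
-- def is_allowlisted(rel_path: str, allowlist: list[str]) -> bool:
--     path = _norm_rel_path(rel_path)
--     boundaries = {path[: i + 1] for i, ch in enumerate(path) if ch == "/"}
--     def hit(entry: str) -> bool:
--         p = _norm_rel_path(entry)
--         return bool(p) and (p if p.endswith("/") else p + "/") in boundaries
--     return any(hit(e) for e in allowlist)
-- ===== Notes on version B (the rewrite author's own statement) =====
-- stated objective: alternative
-- what changed: B replaces A's per-entry startswith scan over the path by a one-time set of the path's slash-boundary prefixes, so each allowlist entry is decided by a single set-membership test on the key prefix+'/'.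
import Mathlib
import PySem

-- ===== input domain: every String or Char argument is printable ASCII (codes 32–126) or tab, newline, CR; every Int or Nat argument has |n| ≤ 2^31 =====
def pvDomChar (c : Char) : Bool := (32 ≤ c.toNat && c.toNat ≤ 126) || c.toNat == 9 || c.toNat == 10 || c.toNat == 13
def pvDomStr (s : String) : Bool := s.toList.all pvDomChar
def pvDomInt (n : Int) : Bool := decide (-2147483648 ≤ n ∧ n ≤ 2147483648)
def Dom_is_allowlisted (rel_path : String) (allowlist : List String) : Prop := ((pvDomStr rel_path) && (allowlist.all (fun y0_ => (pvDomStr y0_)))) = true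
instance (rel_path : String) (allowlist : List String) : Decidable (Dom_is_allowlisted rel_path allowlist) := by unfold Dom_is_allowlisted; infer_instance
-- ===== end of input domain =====

-- B indexes the path's slash-boundary prefixes once and answers each allowlist entry by one set lookup,
-- instead of A's per-entry startswith scan; same result everywhere.

-- ===== PORT A =====
-- _norm_rel_path: strip whitespace, '\' -> '/', then lstrip("./").
-- .lstrip("./") is ported by hand as dropWhile over the char set {'.', '/'} — exact Python semantics.
def normRel (p : List Char) : List Char :=
  (PySem.Chars.replace (PySem.Chars.strip p) ['\\'] ['/']).dropWhile (fun c => c == '.' || c == '/')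

def isAllowLoop (rp : List Char) : List String → Bool
  | [] => false
  | entry :: rest =>
    let p := normRel entry.toList
    if p.isEmpty then isAllowLoop rp rest
    else
      let p' := if PySem.Chars.endswith p ['/'] then p else p ++ ['/']
      if PySem.Chars.startswith rp p' then true else isAllowLoop rp rest

def is_allowlisted (rel_path : String) (allowlist : List String) : Bool :=
  isAllowLoop (normRel rel_path.toList) allowlist

-- ===== PORT B =====
def boundarySet (path : List Char) : PySem.Set (List Char) :=
  PySem.Set.ofList
    (((PySem.List.enumerate path 0).filter (fun ic => ic.2 == '/')).map
      (fun ic => PySem.List.slice path none (some (ic.1 + 1))))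

def is_allowlisted_alt (rel_path : String) (allowlist : List String) : Bool :=
  let path := normRel rel_path.toList
  let boundaries := boundarySet path
  allowlist.any (fun entry =>
    let p := normRel entry.toList
    !p.isEmpty && PySem.Set.contains boundaries (if PySem.Chars.endswith p ['/'] then p else p ++ ['/']))

-- ===== PRECONDITION & SPEC =====
def Spec_is_allowlisted (rel_path : String) (allowlist : List String) (out : Bool) : Prop := out = is_allowlisted_alt rel_path allowlist
instance (rel_path : String) (allowlist : List String) (out : Bool) : Decidable (Spec_is_allowlisted rel_path allowlist out) := by unfold Spec_is_allowlisted; infer_instance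

-- ===== CLAIM (what is proved, stated in full; the proofs are below) =====
def Claim_equal_is_allowlisted : Prop := ∀ (rel_path : String) (allowlist : List String), Dom_is_allowlisted rel_path allowlist → Spec_is_allowlisted rel_path allowlist (is_allowlisted rel_path allowlist)

-- ===== LEMMAS AND PROOFS =====

-- key ∈ boundarySet path ↔ path starts with key, for a key ending in '/'
lemma contains_boundary_iff (path key : List Char) (h : key.getLast? = some '/') :
    PySem.Set.contains (boundarySet path) key = PySem.Chars.startswith path key := by
  have hne : key ≠ [] := by intro hk; simp [hk] at h
  have hlen : 1 ≤ key.length := List.length_pos_iff.mpr hne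
  rw [Bool.eq_iff_iff, PySem.Set.contains_iff, PySem.Chars.startswith_iff]
  unfold boundarySet
  rw [PySem.Set.mem_ofList]
  simp only [List.mem_map, List.mem_filter, PySem.List.mem_enumerate_iff]
  constructor
  · rintro ⟨ic, ⟨⟨k, hk, rfl⟩, -⟩, hkey⟩
    have hcast : (0 + (k : Int)) + 1 = ((k + 1 : Nat) : Int) := by push_cast; ring
    rw [hcast, PySem.List.slice_to_natCast] at hkey
    exact hkey ▸ List.take_prefix (k + 1) path
  · intro hpre
    have hkl : key.length ≤ path.length := hpre.length_le
    have hk : key.length - 1 < path.length := by omega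
    have htake : key = path.take key.length := List.prefix_iff_eq_take.mp hpre
    have hget : path[key.length - 1] = '/' := by
      have h1 : key[key.length - 1]? = some '/' := by
        rw [← List.getLast?_eq_getElem?]; exact h
      have h2 : key[key.length - 1]? = path[key.length - 1]? := by
        obtain ⟨t, rfl⟩ := hpre
        rw [List.getElem?_append_left (by omega)]
      rw [h2, List.getElem?_eq_getElem hk] at h1
      exact Option.some.inj h1
    refine ⟨((key.length - 1 : Nat), path[key.length - 1]), ⟨⟨key.length - 1, hk, by simp⟩, by simp [hget]⟩, ?_⟩
    have hcast : (((key.length - 1 : Nat) : Int)) + 1 = ((key.length : Nat) : Int) := by omega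
    simp only [hcast, PySem.List.slice_to_natCast]
    exact htake.symm

lemma loop_eq_any (rp : List Char) (l : List String) :
    isAllowLoop rp l = l.any (fun entry =>
      let p := normRel entry.toList
      !p.isEmpty && PySem.Chars.startswith rp (if PySem.Chars.endswith p ['/'] then p else p ++ ['/'])) := by
  induction l with
  | nil => rfl
  | cons entry rest ih =>
    simp only [isAllowLoop, List.any_cons, ih]
    split_ifs <;> simp_all

-- the key A builds always ends in '/'
lemma key_getLast (p : List Char) :
    ((if PySem.Chars.endswith p ['/'] then p else p ++ ['/']) : List Char).getLast? = some '/' := by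
  split_ifs with he
  · obtain ⟨t, rfl⟩ := (PySem.Chars.endswith_iff p ['/']).mp he
    exact List.getLast?_concat
  · exact List.getLast?_concat

-- ===== VERDICT (by name: the statement is the Claim_ definition above) =====
theorem is_allowlisted_spec : Claim_equal_is_allowlisted := by
  intro rel_path allowlist _
  unfold Spec_is_allowlisted is_allowlisted is_allowlisted_alt
  rw [loop_eq_any]
  apply congrArg
  funext entry
  simp only [contains_boundary_iff _ _ (key_getLast (normRel entry.toList))]
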